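-- pv_equiv track=rewrite | github.com/frants-jeon/baekjoon | python_solved/BreadthFirstSearch/baekjoon_1697.py | bfs
-- ===== SOURCE A (Python) =====
-- from collections import deque
--
-- def bfs(start, end):
--   que = deque([start])
--   visited = [0] * 100001
--   cnt = 0
--
--   while que:
--     cnt += 1
--     for _ in range(len(que)):
--       node = que.popleft()
--       # 노드를 방문한 적이 없으면 방문 처리 후 탐색
--       if not visited[node]:
--         visited[node] = cnt
--         for i in [node + 1, node -1, node * 2]:
--           if 0 <= i < 100001:
--             if not visited[i]:
--               que.append(i)
--     if visited[end]: break
--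
--   return cnt - 1
-- ===== SOURCE B (Python) =====
-- from collections import deque
--
-- def bfs(start, end):
--     dist = [-1] * 100001
--     dist[start] = 0
--     que = deque([start])
--     while que:
--         node = que.popleft()
--         for i in (node + 1, node - 1, node * 2):
--             if 0 <= i < 100001 and dist[i] == -1:
--                 dist[i] = dist[node] + 1
--                 que.append(i)
--     return dist[end]
-- ===== Notes on version B (the rewrite author's own statement) =====
-- stated objective: idiomatic
-- what changed: B drops A's level-counting machinery entirely (no cnt counter, no inner per-level loop over range(len(que)), no per-level visited[end] check, no mark-on-pop): it is the textbook distance-labelled BFS with a single node-at-a-time queue that marks each node with dist[node]+1 at discovery (so nothing is ever enqueued twice), runs the whole reachable space to exhaustion with no early exit, and simply returns dist[end] (-1 when unreachable).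
-- intended difference: For start <= -2 (with end not congruent to start mod 100001) every move leaves [0,100001) so end is never reached: A still returns 0 (its counter minus one, as if end were found instantly), while B returns -1, the conventional and intended 'no path' answer for an unreachable target. — e.g. on bfs(-100000, 3): A returns 0, B returns -1
import Mathlib
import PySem

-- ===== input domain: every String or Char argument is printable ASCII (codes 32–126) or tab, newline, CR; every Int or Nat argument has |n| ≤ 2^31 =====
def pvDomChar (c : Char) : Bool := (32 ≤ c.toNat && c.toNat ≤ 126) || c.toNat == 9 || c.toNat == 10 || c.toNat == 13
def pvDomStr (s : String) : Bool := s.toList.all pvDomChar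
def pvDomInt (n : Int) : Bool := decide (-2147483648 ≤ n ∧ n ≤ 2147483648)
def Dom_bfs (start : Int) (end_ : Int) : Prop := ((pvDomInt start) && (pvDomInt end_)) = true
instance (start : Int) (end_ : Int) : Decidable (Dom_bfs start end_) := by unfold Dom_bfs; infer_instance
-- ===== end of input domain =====

-- B replaces A's level-counting mark-on-pop BFS (deque, per-level inner loop, cnt, result cnt-1)
-- by the textbook distance-labelled BFS: one node popped per iteration, dist[] set at discovery,
-- no early exit, result dist[end]; B differs from A only on unreachable targets (start ≤ -2, D_bfs).

-- Python lists of fixed length 100001 are ported as Arrays; reads/writes use getD/setIfInBounds,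
-- exact for the in-range indices that occur on inputs admitted by Pre_bfs (outside Pre_ Python raises IndexError).
def vget (a : Array Int) (j : Nat) : Int := a.getD j 0
def vset (a : Array Int) (j : Nat) (x : Int) : Array Int := a.setIfInBounds j x

-- Python's negative-index rule for a list of length 100001: xs[v] reads index v+100001 when v < 0.
def pyIdx (v : Int) : Nat := (if v < 0 then v + 100001 else v).toNat

-- the three moves, in the order both Python sources generate them
def pyNbrs (v : Int) : List Int := [v + 1, v - 1, v * 2]

-- ===== PORT A =====
-- A's inner `for i in [...]`: append i when 0 <= i < 100001 and not visited[i]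
def stepA (vis : Array Int) (acc : Array Int) (i : Int) : Array Int :=
  if 0 ≤ i ∧ i < 100001 then
    (if vget vis i.toNat = 0 then acc.push i else acc)
  else acc

-- A's `for _ in range(len(que))`: pop each current entry; if unvisited, mark with cnt and append moves
def levelA (cnt : Int) : Array Int → Array Int → List Int → Array Int × Array Int
  | vis, acc, [] => (vis, acc)
  | vis, acc, v :: rest =>
    if vget vis (pyIdx v) = 0 then
      let vis1 := vset vis (pyIdx v) cnt
      levelA cnt vis1 ((pyNbrs v).foldl (stepA vis1) acc) rest
    else levelA cnt vis acc rest

-- A's `while que:` loop; fuel is only a totality guard (the loop runs ≤ 100003 iterations, proved below)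
def loopA (end_ : Int) : Nat → List Int → Array Int → Int → Int
  | 0, _, _, cnt => cnt - 1
  | _ + 1, [], _, cnt => cnt - 1
  | fuel + 1, v :: q, vis, cnt =>
    let p := levelA (cnt + 1) vis #[] (v :: q)
    if vget p.1 (pyIdx end_) = 0 then loopA end_ fuel p.2.toList p.1 (cnt + 1)
    else (cnt + 1) - 1

def bfs (start : Int) (end_ : Int) : Int :=
  loopA end_ 200005 [start] (Array.replicate 100001 0) 0

-- ===== PORT B =====
-- B's inner `for i in (...)`: if in range and undiscovered, set dist[i] = dist[node]+1 and enqueue i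
def nstep (node : Int) (p : Array Int × List Int) (i : Int) : Array Int × List Int :=
  if 0 ≤ i ∧ i < 100001 then
    if vget p.1 i.toNat = -1 then
      (vset p.1 i.toNat (vget p.1 (pyIdx node) + 1), p.2 ++ [i])
    else p
  else p

-- B's `while que:` loop: pop ONE node per iteration, no level structure, no early exit;
-- fuel is only a totality guard (each enqueue consumes a -1 cell, so ≤ 100002 iterations occur)
def loopB : Nat → List Int → Array Int → Array Int
  | 0, _, dist => dist
  | _ + 1, [], dist => dist
  | fuel + 1, v :: q, dist =>
    loopB fuel ((pyNbrs v).foldl (nstep v) (dist, q)).2 ((pyNbrs v).foldl (nstep v) (dist, q)).1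

def bfs_alt (start : Int) (end_ : Int) : Int :=
  vget (loopB 300005 [start] (vset (Array.replicate 100001 (-1)) (pyIdx start) 0)) (pyIdx end_)

-- ===== PRECONDITION & SPEC =====
-- Pre_: exactly the inputs where Python A returns; outside it visited[start] or visited[end]
-- raises IndexError (valid Python indices for a list of length 100001 are -100001..100000).
def Pre_bfs (start : Int) (end_ : Int) : Prop :=
  -100001 ≤ start ∧ start ≤ 100000 ∧ -100001 ≤ end_ ∧ end_ ≤ 100000
instance (start : Int) (end_ : Int) : Decidable (Pre_bfs start end_) := by
  unfold Pre_bfs; infer_instance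

def pvWitness_bfs : Int × Int := (0, 17)

-- For start ≤ -2 (end not ≡ start mod 100001) every move leaves [0,100001), so end is never
-- reached: A returns 0 (its counter minus one, as if end were found instantly), B returns -1,
-- the conventional and intended 'no path' answer.
def D_bfs (start : Int) (end_ : Int) : Prop :=
  start ≤ -2 ∧ ¬ (end_ - start) % 100001 = 0
instance (start : Int) (end_ : Int) : Decidable (D_bfs start end_) := by
  unfold D_bfs; infer_instance

def Spec_bfs (start : Int) (end_ : Int) (out : Int) : Prop :=
  ¬ D_bfs start end_ → out = bfs_alt start end_
instance (start : Int) (end_ : Int) (out : Int) : Decidable (Spec_bfs start end_ out) := by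
  unfold Spec_bfs; infer_instance

def pvDiffWitness_bfs : Int × Int := (-100000, 3)
def pvDiffWitnessOut_bfs : Int × Int := (0, -1)

-- ===== CLAIM (what is proved, stated in full; the proofs are below) =====
def Claim_unchanged_bfs : Prop := ∀ (start : Int) (end_ : Int), Dom_bfs start end_ →
  Pre_bfs start end_ → Spec_bfs start end_ (bfs start end_)
def Claim_changed_bfs : Prop :=
  Dom_bfs (pvDiffWitness_bfs.1) (pvDiffWitness_bfs.2) ∧
  Pre_bfs (pvDiffWitness_bfs.1) (pvDiffWitness_bfs.2) ∧
  D_bfs (pvDiffWitness_bfs.1) (pvDiffWitness_bfs.2) ∧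
  bfs (pvDiffWitness_bfs.1) (pvDiffWitness_bfs.2) = pvDiffWitnessOut_bfs.1 ∧
  bfs_alt (pvDiffWitness_bfs.1) (pvDiffWitness_bfs.2) = pvDiffWitnessOut_bfs.2 ∧
  pvDiffWitnessOut_bfs.1 ≠ pvDiffWitnessOut_bfs.2
def Claim_exact_bfs : Prop := ∀ (start : Int) (end_ : Int), Dom_bfs start end_ →
  Pre_bfs start end_ → D_bfs start end_ → bfs start end_ ≠ bfs_alt start end_

-- ===== LEMMAS AND PROOFS =====

-- array-wrapper facts
lemma size_vset (a : Array Int) (j : Nat) (x : Int) : (vset a j x).size = a.size := by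
  simp [vset]

lemma vget_vset_self (a : Array Int) (j : Nat) (x : Int) (h : j < a.size) :
    vget (vset a j x) j = x := by
  simp [vget, vset, Array.getD, h]

lemma vget_vset_ne (a : Array Int) (j k : Nat) (x : Int) (h : k ≠ j) :
    vget (vset a j x) k = vget a k := by
  by_cases hk : k < a.size
  · simp [vget, vset, Array.getD, hk, Array.getElem_setIfInBounds]
    intro he; exact absurd he.symm h
  · simp [vget, vset, Array.getD, hk]

lemma vget_replicate (n j : Nat) : vget (Array.replicate n 0) j = 0 := by
  by_cases h : j < n <;> simp [vget, Array.getD, h]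

lemma vget_replicate_neg (n j : Nat) (h : j < n) : vget (Array.replicate n (-1)) j = -1 := by
  simp [vget, Array.getD, h]

-- pyIdx facts
lemma pyIdx_nonneg (v : Int) (h : 0 ≤ v) : pyIdx v = v.toNat := by
  simp [pyIdx, Int.not_lt.mpr h]

lemma pyIdx_lt (v : Int) (h1 : -100001 ≤ v) (h2 : v ≤ 100000) : pyIdx v < 100001 := by
  unfold pyIdx; split <;> omega

-- "dist[end] is dist[start]" for congruent-mod-100001 in-range indices
lemma pyIdx_eq_of_mod (s e : Int) (hs1 : -100001 ≤ s) (hs2 : s ≤ -2)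
    (he1 : -100001 ≤ e) (he2 : e ≤ 100000) (h : (e - s) % 100001 = 0) :
    pyIdx e = pyIdx s := by
  have hc : e = s ∨ e = s + 100001 := by omega
  rcases hc with h' | h'
  · rw [h']
  · rw [h', pyIdx, pyIdx, if_neg (by omega), if_pos (by omega)]

lemma pyIdx_ne_of_not_mod (s e : Int) (hs1 : -100001 ≤ s) (hs2 : s ≤ -2)
    (he1 : -100001 ≤ e) (he2 : e ≤ 100000) (h : ¬ (e - s) % 100001 = 0) :
    pyIdx e ≠ pyIdx s := by
  intro hEq
  apply h
  revert hEq
  unfold pyIdx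
  split <;> split <;> intro hEq <;> omega

-- membership of a queue index set
def inQ (q : List Int) (j : Nat) : Prop := ∃ v ∈ q, pyIdx v = j

-- boolean mark functions used to express B's dedup discipline
def mkv (va : Array Int) : Nat → Bool := fun j => decide (vget va j ≠ 0)
def mq (va : Array Int) (q : List Int) : Nat → Bool :=
  fun j => decide (vget va j ≠ 0) || q.any (fun v => decide (pyIdx v = j))

-- first-occurrence filter: what B keeps of A's queue, given the marks m
def dedupF (m : Nat → Bool) : List Int → List Int
  | [] => []
  | v :: rest =>
    if m (pyIdx v) then dedupF m rest
    else v :: dedupF (fun j => decide (j = pyIdx v) || m j) rest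

lemma dedupF_congr (m m' : Nat → Bool) (l : List Int) (h : ∀ j, m j = m' j) :
    dedupF m l = dedupF m' l := by
  induction l generalizing m m' with
  | nil => rfl
  | cons v rest ih =>
    simp only [dedupF]
    rw [h (pyIdx v)]
    split
    · exact ih _ _ h
    · exact congrArg _ (ih _ _ (fun j => by rw [h j]))

lemma dedupF_append (m : Nat → Bool) (l : List Int) (x : Int) :
    dedupF m (l ++ [x]) =
      dedupF m l ++
        (if m (pyIdx x) || l.any (fun y => decide (pyIdx y = pyIdx x)) then [] else [x]) := by
  induction l generalizing m with
  | nil => simp [dedupF]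
  | cons v rest ih =>
    rw [List.cons_append]
    simp only [dedupF]
    by_cases hv : m (pyIdx v) = true
    · rw [if_pos hv, if_pos hv, ih m]
      congr 1
      by_cases hx : pyIdx v = pyIdx x
      · have hmx : m (pyIdx x) = true := hx ▸ hv
        simp [hmx]
      · have : (decide (pyIdx v = pyIdx x) : Bool) = false := by simp [hx]
        simp [List.any_cons, this]
    · rw [if_neg hv, if_neg hv, ih]
      rw [List.cons_append]
      congr 2
      by_cases hx : pyIdx x = pyIdx v
      · have h1 : (decide (pyIdx x = pyIdx v) : Bool) = true := by simp [hx]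
        have h2 : (decide (pyIdx v = pyIdx x) : Bool) = true := by simp [hx.symm]
        simp [h1, h2, List.any_cons]
      · have h1 : (decide (pyIdx x = pyIdx v) : Bool) = false := by simp [hx]
        have h2 : (decide (pyIdx v = pyIdx x) : Bool) = false := by
          simp; exact fun hh => hx hh.symm
        simp [h1, h2, List.any_cons]

lemma dedupF_eq_nil (m : Nat → Bool) (l : List Int) (h : dedupF m l = []) :
    ∀ v ∈ l, m (pyIdx v) = true := by
  induction l generalizing m with
  | nil => simp
  | cons v rest ih =>
    intro w hw
    by_cases hv : m (pyIdx v) = true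
    · rcases List.mem_cons.mp hw with rfl | hw
      · exact hv
      · exact ih m (by simpa [dedupF, hv] using h) w hw
    · simp [dedupF, hv] at h

lemma dedupF_mem : ∀ (m : Nat → Bool) (l : List Int) (w : Int),
    w ∈ dedupF m l → m (pyIdx w) = false ∧ w ∈ l := by
  intro m l
  induction l generalizing m with
  | nil => simp [dedupF]
  | cons v rest ih =>
    intro w hw
    by_cases hv : m (pyIdx v) = true
    · simp only [dedupF, if_pos hv] at hw
      obtain ⟨h1, h2⟩ := ih m w hw
      exact ⟨h1, List.mem_cons_of_mem _ h2⟩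
    · simp only [dedupF, if_neg hv] at hw
      rcases List.mem_cons.mp hw with rfl | hw
      · exact ⟨Bool.eq_false_iff.mpr hv, List.mem_cons_self⟩
      · obtain ⟨h1, h2⟩ := ih _ w hw
        refine ⟨?_, List.mem_cons_of_mem _ h2⟩
        rcases Bool.or_eq_false_iff.mp h1 with ⟨-, h⟩
        exact h

lemma dedupF_nodup : ∀ (m : Nat → Bool) (l : List Int), ((dedupF m l).map pyIdx).Nodup := by
  intro m l
  induction l generalizing m with
  | nil => simp [dedupF]
  | cons v rest ih =>
    by_cases hv : m (pyIdx v) = true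
    · simp only [dedupF, if_pos hv]
      exact ih m
    · simp only [dedupF, if_neg hv, List.map_cons]
      refine List.nodup_cons.mpr ⟨?_, ih _⟩
      intro hmem
      obtain ⟨w, hw, hpw⟩ := List.mem_map.mp hmem
      obtain ⟨h1, -⟩ := dedupF_mem _ _ _ hw
      rw [hpw] at h1
      simp at h1

-- number of A-marked cells, for A's fuel bound
def countM (va : Array Int) : Nat :=
  ((Finset.range 100001).filter (fun j => vget va j ≠ 0)).card

lemma countM_le (va : Array Int) : countM va ≤ 100001 := by
  calc countM va ≤ (Finset.range 100001).card := Finset.card_filter_le _ _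
  _ = 100001 := Finset.card_range _

-- number of undiscovered cells, for B's fuel bound
def countF (db : Array Int) : Nat :=
  ((Finset.range 100001).filter (fun j => vget db j = -1)).card

lemma countF_le (db : Array Int) : countF db ≤ 100001 := by
  calc countF db ≤ (Finset.range 100001).card := Finset.card_filter_le _ _
  _ = 100001 := Finset.card_range _

lemma card_step (db db' : Array Int) (out : List Int)
    (hmono : ∀ j, vget db j ≠ -1 → vget db' j = vget db j)
    (hfresh : ∀ w ∈ out, vget db (pyIdx w) = -1 ∧ vget db' (pyIdx w) ≠ -1 ∧ pyIdx w < 100001)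
    (hnd : (out.map pyIdx).Nodup) :
    countF db' + out.length ≤ countF db := by
  have hsub : ((Finset.range 100001).filter (fun j => vget db' j = -1)) ⊆
      ((Finset.range 100001).filter (fun j => vget db j = -1)) := by
    intro j hj
    rw [Finset.mem_filter] at hj ⊢
    refine ⟨hj.1, ?_⟩
    by_contra h
    exact absurd (hmono j h ▸ hj.2) h
  have hT : (out.map pyIdx).toFinset ⊆
      ((Finset.range 100001).filter (fun j => vget db j = -1)) \
      ((Finset.range 100001).filter (fun j => vget db' j = -1)) := by
    intro k hk
    obtain ⟨w, hw, hpw⟩ := List.mem_map.mp (List.mem_toFinset.mp hk)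
    obtain ⟨h1, h2, h3⟩ := hfresh w hw
    rw [Finset.mem_sdiff, Finset.mem_filter, Finset.mem_filter]
    subst hpw
    exact ⟨⟨Finset.mem_range.mpr h3, h1⟩, fun hc => h2 hc.2⟩
  have h1 : out.length ≤
      (((Finset.range 100001).filter (fun j => vget db j = -1)) \
       ((Finset.range 100001).filter (fun j => vget db' j = -1))).card := by
    have := Finset.card_le_card hT
    rwa [List.toFinset_card_of_nodup hnd, List.length_map] at this
  have h2 := Finset.card_sdiff_add_card_eq_card hsub
  unfold countF
  omega

-- one-step unfoldings of the fueled loops (definitional)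
lemma loopA_nil (end_ : Int) (fuel : Nat) (vis : Array Int) (cnt : Int) :
    loopA end_ (fuel + 1) [] vis cnt = cnt - 1 := rfl

lemma loopA_cons (end_ : Int) (fuel : Nat) (v : Int) (q : List Int) (vis : Array Int) (cnt : Int) :
    loopA end_ (fuel + 1) (v :: q) vis cnt =
      (if vget (levelA (cnt + 1) vis #[] (v :: q)).1 (pyIdx end_) = 0 then
        loopA end_ fuel (levelA (cnt + 1) vis #[] (v :: q)).2.toList
          (levelA (cnt + 1) vis #[] (v :: q)).1 (cnt + 1)
      else (cnt + 1) - 1) := rfl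

lemma levelA_nil (cnt : Int) (vis acc : Array Int) : levelA cnt vis acc [] = (vis, acc) := rfl

lemma levelA_cons (cnt : Int) (vis acc : Array Int) (v : Int) (rest : List Int) :
    levelA cnt vis acc (v :: rest) =
      if vget vis (pyIdx v) = 0 then
        levelA cnt (vset vis (pyIdx v) cnt)
          ((pyNbrs v).foldl (stepA (vset vis (pyIdx v) cnt)) acc) rest
      else levelA cnt vis acc rest := rfl

lemma loopB_nil (fuel : Nat) (dist : Array Int) : loopB (fuel + 1) [] dist = dist := rfl

lemma loopB_cons (fuel : Nat) (v : Int) (q : List Int) (dist : Array Int) :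
    loopB (fuel + 1) (v :: q) dist =
      loopB fuel ((pyNbrs v).foldl (nstep v) (dist, q)).2
        ((pyNbrs v).foldl (nstep v) (dist, q)).1 := rfl

-- small step lemmas for nstep
lemma nstep_out (v i : Int) (db : Array Int) (oB : List Int) (h : ¬ (0 ≤ i ∧ i < 100001)) :
    nstep v (db, oB) i = (db, oB) := by simp [nstep, h]

lemma nstep_skip (v i : Int) (db : Array Int) (oB : List Int)
    (h1 : 0 ≤ i ∧ i < 100001) (h2 : ¬ vget db i.toNat = -1) :
    nstep v (db, oB) i = (db, oB) := by simp [nstep, h1, h2]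

lemma nstep_hit (v i : Int) (db : Array Int) (oB : List Int)
    (h1 : 0 ≤ i ∧ i < 100001) (h2 : vget db i.toNat = -1) :
    nstep v (db, oB) i = (vset db i.toNat (vget db (pyIdx v) + 1), oB ++ [i]) := by
  simp [nstep, h1, h2]

-- discoveries do not depend on what is already queued behind
lemma nstep_pre (v i : Int) (db : Array Int) (pre out : List Int) :
    nstep v (db, pre ++ out) i = ((nstep v (db, out) i).1, pre ++ (nstep v (db, out) i).2) := by
  by_cases h1 : 0 ≤ i ∧ i < 100001
  · by_cases h2 : vget db i.toNat = -1
    · rw [nstep_hit v i db (pre ++ out) h1 h2, nstep_hit v i db out h1 h2]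
      simp
    · rw [nstep_skip v i db (pre ++ out) h1 h2, nstep_skip v i db out h1 h2]
  · rw [nstep_out v i db (pre ++ out) h1, nstep_out v i db out h1]

lemma foldl_nstep_pre (ns : List Int) (v : Int) :
    ∀ (db : Array Int) (pre out : List Int),
    ns.foldl (nstep v) (db, pre ++ out) =
      ((ns.foldl (nstep v) (db, out)).1, pre ++ (ns.foldl (nstep v) (db, out)).2) := by
  induction ns with
  | nil => intro db pre out; rfl
  | cons i ns ih =>
    intro db pre out
    simp only [List.foldl_cons]
    rw [nstep_pre]
    exact ih _ _ _

-- processing a node list, accumulating its discoveries (the loop body of B, level-agnostic)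
def procL : Array Int → List Int → Array Int × List Int
  | db, [] => (db, [])
  | db, v :: f =>
    let p := (pyNbrs v).foldl (nstep v) (db, ([] : List Int))
    let r := procL p.1 f
    (r.1, p.2 ++ r.2)

lemma procL_nil (db : Array Int) : procL db [] = (db, []) := rfl

lemma procL_cons (db : Array Int) (v : Int) (f : List Int) :
    procL db (v :: f) =
      ((procL ((pyNbrs v).foldl (nstep v) (db, ([] : List Int))).1 f).1,
        ((pyNbrs v).foldl (nstep v) (db, ([] : List Int))).2 ++
          (procL ((pyNbrs v).foldl (nstep v) (db, ([] : List Int))).1 f).2) := rfl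

-- running B's loop over f ++ g for |f| steps = processing f and queueing its discoveries after g
lemma loopB_chunk : ∀ (f : List Int) (fuel : Nat) (g : List Int) (db : Array Int),
    loopB (f.length + fuel) (f ++ g) db = loopB fuel (g ++ (procL db f).2) (procL db f).1 := by
  intro f
  induction f with
  | nil => intro fuel g db; simp [procL_nil]
  | cons v f ih =>
    intro fuel g db
    have hlen : (v :: f).length + fuel = (f.length + fuel) + 1 := by simp; omega
    rw [hlen, List.cons_append, loopB_cons]
    have hp := foldl_nstep_pre (pyNbrs v) v db (f ++ g) []
    rw [List.append_nil] at hp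
    rw [hp]
    have h2 : (f ++ g) ++ ((pyNbrs v).foldl (nstep v) (db, ([] : List Int))).2 =
        f ++ (g ++ ((pyNbrs v).foldl (nstep v) (db, ([] : List Int))).2) := by
      rw [List.append_assoc]
    simp only [h2]
    rw [ih fuel (g ++ ((pyNbrs v).foldl (nstep v) (db, ([] : List Int))).2) _]
    rw [procL_cons]
    simp [List.append_assoc]

-- B never rewrites a discovered cell
lemma foldl_nstep_mono (ns : List Int) (v : Int) :
    ∀ (db : Array Int) (out : List Int) (j : Nat), vget db j ≠ -1 →
    vget (ns.foldl (nstep v) (db, out)).1 j = vget db j := by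
  induction ns with
  | nil => intro db out j _; rfl
  | cons i ns ih =>
    intro db out j hj
    simp only [List.foldl_cons]
    by_cases h1 : 0 ≤ i ∧ i < 100001
    · by_cases h2 : vget db i.toNat = -1
      · rw [nstep_hit v i db out h1 h2]
        have hne : j ≠ i.toNat := by intro h; rw [h] at hj; exact hj h2
        have hset : vget (vset db i.toNat (vget db (pyIdx v) + 1)) j = vget db j :=
          vget_vset_ne _ _ _ _ hne
        rw [ih _ _ j (by rw [hset]; exact hj), hset]
      · rw [nstep_skip v i db out h1 h2]; exact ih _ _ j hj
    · rw [nstep_out v i db out h1]; exact ih _ _ j hj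

lemma loopB_mono : ∀ (fuel : Nat) (q : List Int) (db : Array Int) (j : Nat),
    vget db j ≠ -1 → vget (loopB fuel q db) j = vget db j := by
  intro fuel
  induction fuel with
  | zero => intro q db j _; rfl
  | succ n ih =>
    intro q db j hj
    cases q with
    | nil => rfl
    | cons v q =>
      rw [loopB_cons]
      have h1 := foldl_nstep_mono (pyNbrs v) v db q j hj
      rw [ih _ _ j (by rw [h1]; exact hj), h1]

-- the value invariant linking B's dist array to A's visited levels:
-- marked cells hold level-1; the unprocessed queue holds d; this level's discoveries hold d+1;
-- everything else is undiscovered (-1)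
def MV (va : Array Int) (rest acc : List Int) (d : Int) (db : Array Int) : Prop :=
  ∀ j, j < 100001 →
    (vget va j ≠ 0 → vget db j = vget va j - 1) ∧
    (vget va j = 0 → inQ rest j → vget db j = d) ∧
    (vget va j = 0 → ¬ inQ rest j → inQ acc j → vget db j = d + 1) ∧
    (vget va j = 0 → ¬ inQ rest j → ¬ inQ acc j → vget db j = -1)

-- small facts about inQ / the boolean mark functions
lemma inQ_nil (j : Nat) : ¬ inQ [] j := by simp [inQ]

lemma inQ_cons (v : Int) (l : List Int) (j : Nat) :
    inQ (v :: l) j ↔ (pyIdx v = j ∨ inQ l j) := by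
  unfold inQ
  constructor
  · rintro ⟨v', hv', rfl⟩
    rcases List.mem_cons.mp hv' with rfl | h
    · exact Or.inl rfl
    · exact Or.inr ⟨v', h, rfl⟩
  · rintro (h | ⟨v', hv', rfl⟩)
    · exact ⟨v, List.mem_cons_self, h⟩
    · exact ⟨v', List.mem_cons_of_mem _ hv', rfl⟩

lemma inQ_append (l : List Int) (x : Int) (j : Nat) :
    inQ (l ++ [x]) j ↔ (inQ l j ∨ pyIdx x = j) := by
  unfold inQ
  constructor
  · rintro ⟨v, hv, rfl⟩
    rcases List.mem_append.mp hv with h | h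
    · exact Or.inl ⟨v, h, rfl⟩
    · rw [List.mem_singleton] at h
      subst h
      exact Or.inr rfl
  · rintro (⟨v, hv, rfl⟩ | h)
    · exact ⟨v, List.mem_append.mpr (Or.inl hv), rfl⟩
    · exact ⟨x, List.mem_append.mpr (Or.inr (List.mem_singleton.mpr rfl)), h⟩

lemma any_eq_inQ (q : List Int) (j : Nat) :
    (q.any fun v => decide (pyIdx v = j)) = true ↔ inQ q j := by
  simp [inQ, List.any_eq_true]

lemma mq_spec (va : Array Int) (q : List Int) (j : Nat) :
    mq va q j = true ↔ (vget va j ≠ 0 ∨ inQ q j) := by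
  simp [mq, inQ, List.any_eq_true]

lemma supp_vset (va : Array Int) (p : Nat) (c : Int) (hc : c ≠ 0) (hp : p < va.size) :
    ∀ j, vget (vset va p c) j ≠ 0 ↔ (j = p ∨ vget va j ≠ 0) := by
  intro j
  by_cases hj : j = p
  · subst hj
    rw [vget_vset_self _ _ _ hp]
    simp [hc]
  · rw [vget_vset_ne _ _ _ _ hj]
    simp [hj]

-- MV bookkeeping: marking the popped node, skipping a stale entry, shifting to the next level
lemma MV_mark (va : Array Int) (v : Int) (rest acc : List Int) (d : Int) (db : Array Int)
    (hva0 : vget va (pyIdx v) = 0) (hsz : pyIdx v < va.size) (hd : 0 ≤ d)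
    (h : MV va (v :: rest) acc d db) :
    MV (vset va (pyIdx v) (d + 1)) rest acc d db := by
  intro j hj
  obtain ⟨m1, m2, m3, m4⟩ := h j hj
  by_cases hjv : j = pyIdx v
  · subst hjv
    have hdb : vget db (pyIdx v) = d := m2 hva0 ((inQ_cons _ _ _).mpr (Or.inl rfl))
    have hset : vget (vset va (pyIdx v) (d + 1)) (pyIdx v) = d + 1 := vget_vset_self _ _ _ hsz
    refine ⟨fun _ => by rw [hdb, hset]; ring, fun h0 => ?_, fun h0 => ?_, fun h0 => ?_⟩ <;>
      (exfalso; rw [hset] at h0; omega)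
  · have hset : vget (vset va (pyIdx v) (d + 1)) j = vget va j := vget_vset_ne _ _ _ _ hjv
    rw [hset]
    have hnc : ∀ hnr : ¬ inQ rest j, ¬ inQ (v :: rest) j := by
      intro hnr hc
      rcases (inQ_cons _ _ _).mp hc with h' | h'
      · exact hjv h'.symm
      · exact hnr h'
    exact ⟨m1, fun h0 hq => m2 h0 ((inQ_cons _ _ _).mpr (Or.inr hq)),
      fun h0 hnr => m3 h0 (hnc hnr), fun h0 hnr => m4 h0 (hnc hnr)⟩

lemma MV_skip (va : Array Int) (v : Int) (rest acc : List Int) (d : Int) (db : Array Int)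
    (hvav : vget va (pyIdx v) ≠ 0)
    (h : MV va (v :: rest) acc d db) :
    MV va rest acc d db := by
  intro j hj
  obtain ⟨m1, m2, m3, m4⟩ := h j hj
  by_cases hjv : j = pyIdx v
  · subst hjv
    exact ⟨m1, fun h0 => absurd h0 hvav, fun h0 => absurd h0 hvav, fun h0 => absurd h0 hvav⟩
  · have hnc : ∀ hnr : ¬ inQ rest j, ¬ inQ (v :: rest) j := by
      intro hnr hc
      rcases (inQ_cons _ _ _).mp hc with h' | h'
      · exact hjv h'.symm
      · exact hnr h'
    exact ⟨m1, fun h0 hq => m2 h0 ((inQ_cons _ _ _).mpr (Or.inr hq)),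
      fun h0 hnr => m3 h0 (hnc hnr), fun h0 hnr => m4 h0 (hnc hnr)⟩

lemma MV_shift (va : Array Int) (q : List Int) (d : Int) (db : Array Int)
    (h : MV va [] q d db) : MV va q [] (d + 1) db := by
  intro j hj
  obtain ⟨m1, m2, m3, m4⟩ := h j hj
  exact ⟨m1, fun h0 hq => m3 h0 (inQ_nil j) hq,
    fun _ _ habs => absurd habs (inQ_nil j),
    fun h0 hnq _ => m4 h0 (inQ_nil j) hnq⟩

-- ===== the per-node simulation (A's inner neighbour fold vs B's) =====

set_option maxHeartbeats 1000000 in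
lemma nb_sim (va : Array Int) (rest : List Int) (d : Int) (v : Int)
    (hd : 0 ≤ d) (hvp : ∀ j, 0 ≤ vget va j)
    (hvav : vget va (pyIdx v) = d + 1) (hpv : pyIdx v < 100001) :
    ∀ (ns : List Int) (db aA : Array Int) (oB : List Int),
    db.size = 100001 →
    MV va rest aA.toList d db →
    oB = dedupF (mq va rest) aA.toList →
    (∀ w ∈ aA.toList, 0 ≤ w ∧ w < 100001) →
    (ns.foldl (nstep v) (db, oB)).1.size = 100001 ∧
    MV va rest ((ns.foldl (stepA va) aA)).toList d (ns.foldl (nstep v) (db, oB)).1 ∧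
    (ns.foldl (nstep v) (db, oB)).2 = dedupF (mq va rest) ((ns.foldl (stepA va) aA)).toList ∧
    (∀ w ∈ ((ns.foldl (stepA va) aA)).toList, 0 ≤ w ∧ w < 100001) ∧
    (∃ t, ((ns.foldl (stepA va) aA)).toList = aA.toList ++ t) ∧
    (∀ j, vget db j ≠ -1 → vget (ns.foldl (nstep v) (db, oB)).1 j = vget db j) ∧
    (∀ i ∈ ns, 0 ≤ i → i < 100001 → vget (ns.foldl (nstep v) (db, oB)).1 i.toNat ≠ -1) := by
  intro ns
  induction ns with
  | nil =>
    intro db aA oB hsz hMV hO hacc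
    exact ⟨hsz, hMV, hO, hacc, ⟨[], by simp⟩, fun j _ => rfl, by simp⟩
  | cons i ns ih =>
    intro db aA oB hsz hMV hO hacc
    simp only [List.foldl_cons]
    by_cases hir : 0 ≤ i ∧ i < 100001
    · have hk : i.toNat < 100001 := by omega
      have hpyi : pyIdx i = i.toNat := pyIdx_nonneg i hir.1
      by_cases hva : vget va i.toNat = 0
      · by_cases hclash : inQ rest i.toNat ∨ inQ aA.toList i.toNat
        · -- A pushes a duplicate/stale i; B skips (already discovered)
          have hdbk_val : vget db i.toNat = d ∨ vget db i.toNat = d + 1 := by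
            obtain ⟨m1, m2, m3, m4⟩ := hMV i.toNat hk
            by_cases hr : inQ rest i.toNat
            · exact Or.inl (m2 hva hr)
            · rcases hclash with h | h
              · exact absurd h hr
              · exact Or.inr (m3 hva hr h)
          have hdbk : ¬ vget db i.toNat = -1 := by rcases hdbk_val with h | h <;> omega
          have hB : nstep v (db, oB) i = (db, oB) := nstep_skip v i db oB hir hdbk
          have hA : stepA va aA i = aA.push i := by rw [stepA, if_pos hir, if_pos hva]
          rw [hA, hB]
          have hcond : (mq va rest (pyIdx i) ||
              aA.toList.any fun y => decide (pyIdx y = pyIdx i)) = true := by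
            rw [hpyi]
            rcases hclash with h | h
            · have h2 : mq va rest i.toNat = true := (mq_spec _ _ _).mpr (Or.inr h)
              rw [h2]; rfl
            · have h2 : (aA.toList.any fun y => decide (pyIdx y = i.toNat)) = true :=
                (any_eq_inQ _ _).mpr h
              rw [h2, Bool.or_true]
          have hMV' : MV va rest (aA.push i).toList d db := by
            intro j hj
            obtain ⟨m1, m2, m3, m4⟩ := hMV j hj
            refine ⟨m1, m2, ?_, ?_⟩
            · intro h0 hnr hacc'
              rw [Array.toList_push, inQ_append] at hacc'
              rcases hacc' with h | h
              · exact m3 h0 hnr h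
              · rw [hpyi] at h
                subst h
                rcases hclash with hcl | hcl
                · exact absurd hcl hnr
                · exact m3 h0 hnr hcl
            · intro h0 hnr hacc'
              rw [Array.toList_push, inQ_append] at hacc'
              push_neg at hacc'
              exact m4 h0 hnr hacc'.1
          obtain ⟨s1, s2, s3, s4, s5, s6, s7⟩ := ih db (aA.push i) oB hsz hMV'
            (by rw [Array.toList_push, dedupF_append, ← hO, hcond]; simp)
            (fun w hw => by
              rw [Array.toList_push] at hw
              rcases List.mem_append.mp hw with h | h
              · exact hacc w h
              · rw [List.mem_singleton] at h; subst h; exact hir)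
          refine ⟨s1, s2, s3, s4, ?_, s6, ?_⟩
          · obtain ⟨t, ht⟩ := s5
            exact ⟨[i] ++ t, by rw [ht, Array.toList_push, List.append_assoc]⟩
          · intro i' hi' h1 h2
            rcases List.mem_cons.mp hi' with rfl | hmem
            · rw [s6 _ hdbk]; exact hdbk
            · exact s7 i' hmem h1 h2
        · -- fresh discovery: A pushes, B marks with d+1 and enqueues
          push_neg at hclash
          have hdbk : vget db i.toNat = -1 := by
            obtain ⟨-, -, -, m4⟩ := hMV i.toNat hk
            exact m4 hva hclash.1 hclash.2
          have hdv : vget db (pyIdx v) = d := by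
            obtain ⟨m1, -, -, -⟩ := hMV (pyIdx v) hpv
            have h1 : vget va (pyIdx v) ≠ 0 := by rw [hvav]; omega
            have := m1 h1
            rw [hvav] at this
            omega
          have hB : nstep v (db, oB) i =
              (vset db i.toNat (vget db (pyIdx v) + 1), oB ++ [i]) := nstep_hit v i db oB hir hdbk
          have hA : stepA va aA i = aA.push i := by rw [stepA, if_pos hir, if_pos hva]
          rw [hA, hB]
          have hwv : vget db (pyIdx v) + 1 = d + 1 := by rw [hdv]
          have hksz : i.toNat < db.size := by rw [hsz]; exact hk
          have hMV' : MV va rest (aA.push i).toList d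
              (vset db i.toNat (vget db (pyIdx v) + 1)) := by
            intro j hj
            obtain ⟨m1, m2, m3, m4⟩ := hMV j hj
            by_cases hji : j = i.toNat
            · subst hji
              have hset : vget (vset db i.toNat (vget db (pyIdx v) + 1)) i.toNat = d + 1 := by
                rw [vget_vset_self _ _ _ hksz, hwv]
              refine ⟨fun h0 => absurd hva h0, fun _ hr => absurd hr hclash.1,
                fun _ _ _ => hset, fun _ _ hna => ?_⟩
              exfalso
              apply hna
              rw [Array.toList_push, inQ_append]
              exact Or.inr hpyi
            · have hset : vget (vset db i.toNat (vget db (pyIdx v) + 1)) j = vget db j :=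
                vget_vset_ne _ _ _ _ hji
              rw [hset]
              refine ⟨m1, m2, ?_, ?_⟩
              · intro h0 hnr hacc'
                rw [Array.toList_push, inQ_append] at hacc'
                rcases hacc' with h | h
                · exact m3 h0 hnr h
                · rw [hpyi] at h; exact absurd h.symm hji
              · intro h0 hnr hacc'
                rw [Array.toList_push, inQ_append] at hacc'
                push_neg at hacc'
                exact m4 h0 hnr hacc'.1
          have hO' : oB ++ [i] = dedupF (mq va rest) (aA.push i).toList := by
            rw [Array.toList_push, dedupF_append, ← hO]
            have hmq : mq va rest (pyIdx i) = false := by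
              rw [hpyi, Bool.eq_false_iff]
              intro h
              rcases (mq_spec _ _ _).mp h with h' | h'
              · exact h' hva
              · exact hclash.1 h'
            have hany : (aA.toList.any fun y => decide (pyIdx y = pyIdx i)) = false := by
              rw [hpyi, Bool.eq_false_iff]
              intro h
              exact hclash.2 ((any_eq_inQ _ _).mp h)
            rw [hmq, hany]
            simp
          obtain ⟨s1, s2, s3, s4, s5, s6, s7⟩ := ih (vset db i.toNat (vget db (pyIdx v) + 1))
            (aA.push i) (oB ++ [i]) (by rw [size_vset]; exact hsz) hMV' hO'
            (fun w hw => by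
              rw [Array.toList_push] at hw
              rcases List.mem_append.mp hw with h | h
              · exact hacc w h
              · rw [List.mem_singleton] at h; subst h; exact hir)
          refine ⟨s1, s2, s3, s4, ?_, ?_, ?_⟩
          · obtain ⟨t, ht⟩ := s5
            exact ⟨[i] ++ t, by rw [ht, Array.toList_push, List.append_assoc]⟩
          · intro j hj
            have hne : j ≠ i.toNat := by intro h; rw [h] at hj; exact hj hdbk
            have hset : vget (vset db i.toNat (vget db (pyIdx v) + 1)) j = vget db j :=
              vget_vset_ne _ _ _ _ hne
            rw [s6 j (by rw [hset]; exact hj), hset]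
          · intro i' hi' h1 h2
            rcases List.mem_cons.mp hi' with rfl | hmem
            · have hset : vget (vset db i'.toNat (vget db (pyIdx v) + 1)) i'.toNat = d + 1 := by
                rw [vget_vset_self _ _ _ hksz, hwv]
              rw [s6 _ (by rw [hset]; omega), hset]
              omega
            · exact s7 i' hmem h1 h2
      · -- i already A-visited: both skip
        have hA : stepA va aA i = aA := by rw [stepA, if_pos hir, if_neg hva]
        have hdbk : ¬ vget db i.toNat = -1 := by
          obtain ⟨m1, -, -, -⟩ := hMV i.toNat hk
          have := m1 hva
          have hp := hvp i.toNat
          omega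
        have hB : nstep v (db, oB) i = (db, oB) := nstep_skip v i db oB hir hdbk
        rw [hA, hB]
        obtain ⟨s1, s2, s3, s4, s5, s6, s7⟩ := ih db aA oB hsz hMV hO hacc
        refine ⟨s1, s2, s3, s4, s5, s6, ?_⟩
        intro i' hi' h1 h2
        rcases List.mem_cons.mp hi' with rfl | hmem
        · rw [s6 _ hdbk]; exact hdbk
        · exact s7 i' hmem h1 h2
    · -- out of range: both skip
      have hA : stepA va aA i = aA := by rw [stepA, if_neg hir]
      have hB : nstep v (db, oB) i = (db, oB) := nstep_out v i db oB hir
      rw [hA, hB]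
      obtain ⟨s1, s2, s3, s4, s5, s6, s7⟩ := ih db aA oB hsz hMV hO hacc
      refine ⟨s1, s2, s3, s4, s5, s6, ?_⟩
      intro i' hi' h1 h2
      rcases List.mem_cons.mp hi' with rfl | hmem
      · exact absurd ⟨h1, h2⟩ hir
      · exact s7 i' hmem h1 h2

-- ===== the per-level simulation =====

set_option maxHeartbeats 1000000 in
lemma level_sim (d : Int) (hd : 0 ≤ d) :
    ∀ (q : List Int), ∀ (va db aA : Array Int),
    va.size = 100001 → db.size = 100001 →
    (∀ j, 0 ≤ vget va j) →
    (∀ u ∈ q, pyIdx u < 100001) →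
    (∀ w1 ∈ q, ∀ w2 ∈ q, pyIdx w1 = pyIdx w2 → w1 = w2) →
    MV va q aA.toList d db →
    (∀ w ∈ aA.toList, 0 ≤ w ∧ w < 100001) →
    (levelA (d + 1) va aA q).1.size = 100001 ∧
    (procL db (dedupF (mkv va) q)).1.size = 100001 ∧
    (∀ j, vget (levelA (d + 1) va aA q).1 j ≠ 0 ↔ (vget va j ≠ 0 ∨ inQ q j)) ∧
    (∀ j, vget (levelA (d + 1) va aA q).1 j = vget va j ∨
        (vget (levelA (d + 1) va aA q).1 j = d + 1 ∧ vget va j = 0)) ∧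
    MV (levelA (d + 1) va aA q).1 [] (levelA (d + 1) va aA q).2.toList d
      (procL db (dedupF (mkv va) q)).1 ∧
    dedupF (mq va q) aA.toList ++ (procL db (dedupF (mkv va) q)).2
      = dedupF (mkv (levelA (d + 1) va aA q).1) (levelA (d + 1) va aA q).2.toList ∧
    (∀ w ∈ (levelA (d + 1) va aA q).2.toList, 0 ≤ w ∧ w < 100001) ∧
    (∀ j, vget db j ≠ -1 → vget (procL db (dedupF (mkv va) q)).1 j = vget db j) ∧
    (∀ v ∈ q, vget va (pyIdx v) = 0 → ∀ i ∈ pyNbrs v, 0 ≤ i → i < 100001 →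
        vget (procL db (dedupF (mkv va) q)).1 i.toNat ≠ -1) ∧
    ((∀ v ∈ q, vget va (pyIdx v) ≠ 0) → (levelA (d + 1) va aA q).2 = aA) := by
  intro q
  induction q with
  | nil =>
    intro va db aA hva hsz hvp hq hinj hMV hacc
    rw [show dedupF (mkv va) ([] : List Int) = [] from rfl, procL_nil, levelA_nil]
    refine ⟨hva, hsz, ?_, fun j => Or.inl rfl, hMV, ?_, hacc, fun j _ => rfl, by simp, fun _ => rfl⟩
    · intro j
      constructor
      · exact fun h => Or.inl h
      · rintro (h | h)
        · exact h
        · exact absurd h (inQ_nil j)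
    · rw [List.append_nil]
      exact dedupF_congr _ _ _ (fun j => by simp [mq, mkv])
  | cons v rest ih =>
    intro va db aA hva hsz hvp hq hinj hMV hacc
    have hpv : pyIdx v < 100001 := hq v List.mem_cons_self
    have hpvsz : pyIdx v < va.size := by rw [hva]; exact hpv
    by_cases hvv : vget va (pyIdx v) = 0
    · -- A marks v; B kept v at the head of its frontier
      have hself : vget (vset va (pyIdx v) (d + 1)) (pyIdx v) = d + 1 :=
        vget_vset_self _ _ _ hpvsz
      have hva1sz : (vset va (pyIdx v) (d + 1)).size = 100001 := by
        rw [size_vset]; exact hva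
      have hvp1 : ∀ j, 0 ≤ vget (vset va (pyIdx v) (d + 1)) j := by
        intro j
        by_cases hj : j = pyIdx v
        · subst hj; rw [hself]; omega
        · rw [vget_vset_ne _ _ _ _ hj]; exact hvp j
      have hded : dedupF (mkv va) (v :: rest) =
          v :: dedupF (mkv (vset va (pyIdx v) (d + 1))) rest := by
        simp only [dedupF]
        rw [if_neg (by simp [mkv, hvv])]
        congr 1
        refine dedupF_congr _ _ rest (fun j => ?_)
        by_cases hj : j = pyIdx v
        · subst hj
          have h1 : vget (vset va (pyIdx v) (d + 1)) (pyIdx v) ≠ 0 := by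
            rw [vget_vset_self _ _ _ hpvsz]; omega
          simp [mkv, h1]
        · simp [mkv, hj, vget_vset_ne va (pyIdx v) j (d + 1) hj]
      rw [levelA_cons, if_pos hvv, hded, procL_cons]
      have hMV1 : MV (vset va (pyIdx v) (d + 1)) rest aA.toList d db :=
        MV_mark va v rest aA.toList d db hvv hpvsz hd hMV
      obtain ⟨n1, n2, n3, n4, n5, n6, n7⟩ :=
        nb_sim (vset va (pyIdx v) (d + 1)) rest d v hd hvp1 hself hpv (pyNbrs v) db aA
          (dedupF (mq (vset va (pyIdx v) (d + 1)) rest) aA.toList) hsz hMV1 rfl hacc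
      have hPp := foldl_nstep_pre (pyNbrs v) v db
        (dedupF (mq (vset va (pyIdx v) (d + 1)) rest) aA.toList) []
      rw [List.append_nil] at hPp
      rw [hPp] at n1 n2 n3 n6 n7
      dsimp only at n1 n2 n3 n6 n7
      -- n1..n7 are now about the fold starting from the empty out-list
      obtain ⟨L1, L2, L3, L4, L5, L6, L7, L8, L9, L10⟩ :=
        ih (vset va (pyIdx v) (d + 1))
          ((pyNbrs v).foldl (nstep v) (db, ([] : List Int))).1
          ((pyNbrs v).foldl (stepA (vset va (pyIdx v) (d + 1))) aA)
          hva1sz n1 hvp1 (fun u hu => hq u (List.mem_cons_of_mem v hu))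
          (fun w1 h1 w2 h2 => hinj w1 (List.mem_cons_of_mem v h1) w2 (List.mem_cons_of_mem v h2))
          n2 n4
      have hcg : dedupF (mq va (v :: rest)) aA.toList
          = dedupF (mq (vset va (pyIdx v) (d + 1)) rest) aA.toList := by
        refine dedupF_congr _ _ _ (fun j => ?_)
        by_cases hj : j = pyIdx v
        · subst hj
          have h1 : vget (vset va (pyIdx v) (d + 1)) (pyIdx v) ≠ 0 := by
            rw [vget_vset_self _ _ _ hpvsz]; omega
          simp [mq, List.any_cons, h1]
        · have hne : ¬ (pyIdx v = j) := fun he => hj he.symm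
          simp [mq, List.any_cons, hne, vget_vset_ne va (pyIdx v) j (d + 1) hj]
      refine ⟨L1, L2, ?_, ?_, L5, ?_, L7, ?_, ?_, ?_⟩
      · intro j
        rw [L3 j, inQ_cons]
        have hs := supp_vset va (pyIdx v) (d + 1) (by omega) hpvsz j
        constructor
        · rintro (h | h)
          · rcases hs.mp h with h' | h'
            · exact Or.inr (Or.inl h'.symm)
            · exact Or.inl h'
          · exact Or.inr (Or.inr h)
        · rintro (h | h | h)
          · exact Or.inl (hs.mpr (Or.inr h))
          · exact Or.inl (hs.mpr (Or.inl h.symm))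
          · exact Or.inr h
      · intro j
        rcases L4 j with h | ⟨h1, h2⟩
        · by_cases hj : j = pyIdx v
          · subst hj
            rw [hself] at h
            exact Or.inr ⟨h, hvv⟩
          · rw [vget_vset_ne _ _ _ _ hj] at h
            exact Or.inl h
        · have hj : j ≠ pyIdx v := by
            intro he
            rw [he, hself] at h2
            omega
          rw [vget_vset_ne _ _ _ _ hj] at h2
          exact Or.inr ⟨h1, h2⟩
      · rw [hcg, ← List.append_assoc, n3]
        exact L6
      · intro j hj
        rw [L8 j (by rw [n6 j hj]; exact hj), n6 j hj]
      · intro u hu hu0 i hi h1 h2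
        rcases List.mem_cons.mp hu with rfl | hmem
        · have h := n7 i hi h1 h2
          rw [L8 _ h]; exact h
        · by_cases hju : pyIdx u = pyIdx v
          · have huv : u = v :=
              hinj u (List.mem_cons_of_mem v hmem) v List.mem_cons_self hju
            subst huv
            have h := n7 i hi h1 h2
            rw [L8 _ h]; exact h
          · refine L9 u hmem ?_ i hi h1 h2
            rw [vget_vset_ne _ _ _ _ hju]
            exact hu0
      · intro hall
        exact absurd hvv (fun _ => (hall v List.mem_cons_self) hvv)
    · -- A skips v (already visited); B dropped it from the frontier
      have hded : dedupF (mkv va) (v :: rest) = dedupF (mkv va) rest := by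
        simp only [dedupF]
        rw [if_pos (by simp [mkv, hvv])]
      rw [levelA_cons, if_neg hvv, hded]
      obtain ⟨L1, L2, L3, L4, L5, L6, L7, L8, L9, L10⟩ :=
        ih va db aA hva hsz hvp (fun u hu => hq u (List.mem_cons_of_mem v hu))
          (fun w1 h1 w2 h2 => hinj w1 (List.mem_cons_of_mem v h1) w2 (List.mem_cons_of_mem v h2))
          (MV_skip va v rest aA.toList d db hvv hMV) hacc
      have hcg : dedupF (mq va (v :: rest)) aA.toList = dedupF (mq va rest) aA.toList := by
        refine dedupF_congr _ _ _ (fun j => ?_)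
        by_cases hj : j = pyIdx v
        · subst hj
          simp [mq, hvv]
        · have hne : ¬ (pyIdx v = j) := fun he => hj he.symm
          simp [mq, List.any_cons, hne]
      refine ⟨L1, L2, ?_, L4, L5, ?_, L7, L8, ?_, ?_⟩
      · intro j
        rw [L3 j, inQ_cons]
        constructor
        · rintro (h | h)
          · exact Or.inl h
          · exact Or.inr (Or.inr h)
        · rintro (h | h | h)
          · exact Or.inl h
          · rw [← h]; exact Or.inl hvv
          · exact Or.inr h
      · rw [hcg]; exact L6
      · intro u hu hu0 i hi h1 h2
        rcases List.mem_cons.mp hu with rfl | hmem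
        · exact absurd hu0 hvv
        · exact L9 u hmem hu0 i hi h1 h2
      · intro hall
        exact L10 (fun w hw => hall w (List.mem_cons_of_mem v hw))

-- any marked set containing the seed index, the seed's moves, and closed under moves away
-- from non-seed members, covers every index (the +1/-1 chain)
lemma closure_total (start : Int) (S : Nat → Prop)
    (hs1 : -1 ≤ start) (hs2 : start ≤ 100000)
    (h0 : S (pyIdx start))
    (hseed : ∀ i ∈ pyNbrs start, 0 ≤ i → i < 100001 → S i.toNat)
    (hcl : ∀ j, j < 100001 → S j → j ≠ pyIdx start →
        ∀ i ∈ pyNbrs (j : Int), 0 ≤ i → i < 100001 → S i.toNat) :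
    ∀ j, j < 100001 → S j := by
  by_cases hstart : start = -1
  · subst hstart
    have h100000 : pyIdx (-1) = 100000 := by decide
    have h0' : S 0 := by
      have := hseed 0 (by simp [pyNbrs]) (by norm_num) (by norm_num)
      simpa using this
    have up : ∀ k, k ≤ 100000 → S k := by
      intro k
      induction k with
      | zero => exact fun _ => h0'
      | succ n ihn =>
        intro hk
        have hn : S n := ihn (by omega)
        have hne : n ≠ pyIdx (-1) := by rw [h100000]; omega
        have := hcl n (by omega) hn hne ((n : Int) + 1) (by simp [pyNbrs])
          (by positivity) (by omega)
        have hcast : ((n : Int) + 1).toNat = n + 1 := by omega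
        rwa [hcast] at this
    exact fun j hj => up j (by omega)
  · have hs0 : 0 ≤ start := by omega
    have hpy : pyIdx start = start.toNat := pyIdx_nonneg _ hs0
    have up : ∀ k, start.toNat + k ≤ 100000 → S (start.toNat + k) := by
      intro k
      induction k with
      | zero => exact fun _ => by simpa [hpy] using h0
      | succ n ihn =>
        intro hk
        have hn : S (start.toNat + n) := ihn (by omega)
        by_cases hz : n = 0
        · subst hz
          have := hseed (start + 1) (by simp [pyNbrs]) (by omega) (by omega)
          have hcast : (start + 1).toNat = start.toNat + 0 + 1 := by omega
          rwa [hcast] at this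
        · have hne : start.toNat + n ≠ pyIdx start := by rw [hpy]; omega
          have := hcl (start.toNat + n) (by omega) hn hne (((start.toNat + n : Nat) : Int) + 1)
            (by simp [pyNbrs]) (by positivity) (by omega)
          have hcast : (((start.toNat + n : Nat) : Int) + 1).toNat = start.toNat + (n + 1) := by omega
          rwa [hcast] at this
    have down : ∀ k, k ≤ start.toNat → S (start.toNat - k) := by
      intro k
      induction k with
      | zero => exact fun _ => by simpa [hpy] using h0
      | succ n ihn =>
        intro hk
        have hn : S (start.toNat - n) := ihn (by omega)
        by_cases hz : n = 0
        · subst hz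
          have := hseed (start - 1) (by simp [pyNbrs]) (by omega) (by omega)
          have hcast : (start - 1).toNat = start.toNat - 1 := by omega
          rwa [hcast] at this
        · have hne : start.toNat - n ≠ pyIdx start := by rw [hpy]; omega
          have := hcl (start.toNat - n) (by omega) hn hne (((start.toNat - n : Nat) : Int) - 1)
            (by simp [pyNbrs]) (by omega) (by omega)
          have hcast : (((start.toNat - n : Nat) : Int) - 1).toNat = start.toNat - (n + 1) := by omega
          rwa [hcast] at this
    intro j hj
    rcases Nat.lt_or_ge j start.toNat with hlt | hle
    · have := down (start.toNat - j) (by omega)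
      rwa [show start.toNat - (start.toNat - j) = j by omega] at this
    · have := up (j - start.toNat) (by omega)
      rwa [show start.toNat + (j - start.toNat) = j by omega] at this

-- ===== the main loop simulation =====
set_option maxHeartbeats 1600000 in
lemma main_sim (start end_ : Int)
    (hs1 : -1 ≤ start) (hs2 : start ≤ 100000)
    (he1 : -100001 ≤ end_) (he2 : end_ ≤ 100000) :
    ∀ (fuelA : Nat), ∀ (q : List Int) (va db : Array Int) (d : Int) (fuelB : Nat),
    va.size = 100001 → db.size = 100001 →
    q ≠ [] → 0 ≤ d →
    (∀ v ∈ q, (0 ≤ v ∧ v < 100001) ∨ v = start) →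
    (∀ w1 ∈ q, ∀ w2 ∈ q, pyIdx w1 = pyIdx w2 → w1 = w2) →
    (∀ j, 0 ≤ vget va j) →
    MV va q [] d db →
    (vget va (pyIdx end_) = 0 ∨ d = 0) →
    (d = 0 → (∀ j, vget va j = 0) ∧ q = [start]) →
    (1 ≤ d → vget va (pyIdx start) ≠ 0) →
    (1 ≤ d → ∀ i ∈ pyNbrs start, 0 ≤ i → i < 100001 → vget db i.toNat ≠ -1) →
    (∀ j, j < 100001 → vget va j ≠ 0 → j ≠ pyIdx start →
        ∀ i ∈ pyNbrs (j : Int), 0 ≤ i → i < 100001 → vget db i.toNat ≠ -1) →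
    2 * (100001 - countM va) + 2 ≤ fuelA →
    (dedupF (mkv va) q).length + 2 * countF db + 1 ≤ fuelB →
    loopA end_ fuelA q va d = vget (loopB fuelB (dedupF (mkv va) q) db) (pyIdx end_) := by
  intro fuelA
  induction fuelA using Nat.strong_induction_on with
  | _ fuelA IH =>
    intro q va db d fuelB hva hsz hqne hd hq hinj hvp hMV hend hseed0 hseed1 hclseed hcl hfuelA hfuelB
    have hpe : pyIdx end_ < 100001 := pyIdx_lt end_ he1 he2
    have hps : pyIdx start < 100001 := pyIdx_lt start (by omega) hs2
    obtain ⟨fl, rfl⟩ : ∃ fl, fuelA = fl + 1 := ⟨fuelA - 1, by omega⟩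
    obtain ⟨v, qt, rfl⟩ : ∃ v qt, q = v :: qt := by
      cases q with
      | nil => exact absurd rfl hqne
      | cons v qt => exact ⟨v, qt, rfl⟩
    have hqidx : ∀ u ∈ v :: qt, pyIdx u < 100001 := by
      intro u hu
      rcases hq u hu with ⟨h1, h2⟩ | rfl
      · rw [pyIdx_nonneg u h1]; omega
      · exact hps
    cases hF : dedupF (mkv va) (v :: qt) with
    | nil =>
      exfalso
      have hall := dedupF_eq_nil _ _ hF
      have hd1 : 1 ≤ d := by
        by_contra hlt
        have hd0 : d = 0 := by omega
        obtain ⟨hz0, hq0⟩ := hseed0 hd0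
        have hst := hall start (by rw [hq0]; exact List.mem_cons_self)
        simp [mkv, hz0 (pyIdx start)] at hst
      have hSof : ∀ j, j < 100001 → vget db j ≠ -1 → vget va j ≠ 0 := by
        intro j hj hb h0
        by_cases hr : inQ (v :: qt) j
        · obtain ⟨u, hu, hpu⟩ := hr
          have := hall u hu
          rw [hpu] at this
          simp [mkv] at this
          exact this h0
        · obtain ⟨-, -, -, m4⟩ := hMV j hj
          exact hb (m4 h0 hr (inQ_nil j))
      have htot := closure_total start (fun j => vget va j ≠ 0) hs1 hs2
        (hseed1 hd1)
        (fun i hi h1 h2 => hSof _ (by omega) (hclseed hd1 i hi h1 h2))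
        (fun j hj hSj hjne i hi h1 h2 => hSof _ (by omega) (hcl j hj hSj hjne i hi h1 h2))
      have hEnd := htot (pyIdx end_) hpe
      rcases hend with h | h
      · exact hEnd h
      · omega
    | cons w ft =>
      obtain ⟨L1, L2, L3, L4, L5, L6, L7, L8, L9, L10⟩ :=
        level_sim d hd (v :: qt) va db #[] hva hsz hvp hqidx hinj hMV (by simp)
      rw [hF] at L2 L5 L6 L8 L9 hfuelB
      have hL6' : (procL db (w :: ft)).2 =
          dedupF (mkv (levelA (d + 1) va #[] (v :: qt)).1)
            (levelA (d + 1) va #[] (v :: qt)).2.toList := by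
        simpa using L6
      have hend0 : vget va (pyIdx end_) = 0 := by
        rcases hend with h | h
        · exact h
        · exact (hseed0 h).1 _
      obtain ⟨fuelB', hfB⟩ : ∃ f', fuelB = (w :: ft).length + f' :=
        ⟨fuelB - (w :: ft).length, by omega⟩
      have hchunk : loopB fuelB (w :: ft) db =
          loopB fuelB' (procL db (w :: ft)).2 (procL db (w :: ft)).1 := by
        rw [hfB]
        have h := loopB_chunk (w :: ft) fuelB' [] db
        rw [List.append_nil] at h
        rw [h]
        simp
      rw [loopA_cons, hchunk]
      by_cases hz : vget (levelA (d + 1) va #[] (v :: qt)).1 (pyIdx end_) = 0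
      · rw [if_pos hz]
        by_cases hq2 : (levelA (d + 1) va #[] (v :: qt)).2.toList = []
        · exfalso
          have hBS0 : ∀ j, j < 100001 → vget (procL db (w :: ft)).1 j ≠ -1 →
              vget (levelA (d + 1) va #[] (v :: qt)).1 j ≠ 0 := by
            intro j hj hbj h0
            obtain ⟨-, -, -, m4⟩ := L5 j hj
            exact hbj (m4 h0 (inQ_nil j) (by rw [hq2]; exact inQ_nil j))
          have hS0 : vget (levelA (d + 1) va #[] (v :: qt)).1 (pyIdx start) ≠ 0 := by
            by_cases hd0 : d = 0
            · obtain ⟨hz0, hq0⟩ := hseed0 hd0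
              exact (L3 (pyIdx start)).mpr
                (Or.inr ⟨start, by rw [hq0]; exact List.mem_cons_self, rfl⟩)
            · exact (L3 _).mpr (Or.inl (hseed1 (by omega)))
          have hseedB : ∀ i ∈ pyNbrs start, 0 ≤ i → i < 100001 →
              vget (procL db (w :: ft)).1 i.toNat ≠ -1 := by
            intro i hi h1 h2
            by_cases hd0 : d = 0
            · obtain ⟨hz0, hq0⟩ := hseed0 hd0
              exact L9 start (by rw [hq0]; exact List.mem_cons_self) (hz0 _) i hi h1 h2
            · have h := hclseed (by omega) i hi h1 h2
              rw [L8 _ h]; exact h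
          have hclB : ∀ j, j < 100001 → vget (levelA (d + 1) va #[] (v :: qt)).1 j ≠ 0 →
              j ≠ pyIdx start → ∀ i ∈ pyNbrs (j : Int), 0 ≤ i → i < 100001 →
              vget (procL db (w :: ft)).1 i.toNat ≠ -1 := by
            intro j hj hSj hjne i hi h1 h2
            rcases (L3 j).mp hSj with h | ⟨u, hu, hpu⟩
            · have h' := hcl j hj h hjne i hi h1 h2
              rw [L8 _ h']; exact h'
            · rcases hq u hu with ⟨hu1, hu2⟩ | rfl
              · have huj : u = (j : Int) := by
                  rw [pyIdx_nonneg u hu1] at hpu; omega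
                by_cases hvu : vget va j = 0
                · refine L9 u hu ?_ i ?_ h1 h2
                  · rw [hpu]; exact hvu
                  · rw [huj]; exact hi
                · have h' := hcl j hj hvu hjne i hi h1 h2
                  rw [L8 _ h']; exact h'
              · exact absurd hpu.symm hjne
          have htot := closure_total start
            (fun j => vget (levelA (d + 1) va #[] (v :: qt)).1 j ≠ 0) hs1 hs2 hS0
            (fun i hi h1 h2 => hBS0 _ (by omega) (hseedB i hi h1 h2))
            (fun j hj hSj hjne i hi h1 h2 => hBS0 _ (by omega) (hclB j hj hSj hjne i hi h1 h2))
          exact (htot (pyIdx end_) hpe) hz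
        · -- strictly more cells are A-marked each level: A's fuel suffices
          have hgrow : ∃ u ∈ v :: qt, vget va (pyIdx u) = 0 := by
            by_contra hno
            push_neg at hno
            exact hq2 (by rw [L10 (fun w' hw' => hno w' hw')])
          obtain ⟨u, hu, hu0⟩ := hgrow
          have hcm : countM va < countM (levelA (d + 1) va #[] (v :: qt)).1 := by
            apply Finset.card_lt_card
            rw [Finset.ssubset_iff_of_subset]
            · refine ⟨pyIdx u, ?_, ?_⟩
              · rw [Finset.mem_filter]
                exact ⟨Finset.mem_range.mpr (hqidx u hu), (L3 _).mpr (Or.inr ⟨u, hu, rfl⟩)⟩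
              · rw [Finset.mem_filter]
                rintro ⟨-, hcon⟩
                exact hcon hu0
            · intro j hj
              rw [Finset.mem_filter] at hj ⊢
              exact ⟨hj.1, (L3 j).mpr (Or.inl hj.2)⟩
          have hcle := countM_le (levelA (d + 1) va #[] (v :: qt)).1
          -- each of B's discoveries consumed a fresh (-1) cell: B's fuel suffices
          have hS0 : vget (levelA (d + 1) va #[] (v :: qt)).1 (pyIdx start) ≠ 0 := by
            by_cases hd0 : d = 0
            · obtain ⟨hz0, hq0⟩ := hseed0 hd0
              exact (L3 (pyIdx start)).mpr
                (Or.inr ⟨start, by rw [hq0]; exact List.mem_cons_self, rfl⟩)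
            · exact (L3 _).mpr (Or.inl (hseed1 (by omega)))
          have hseedB : ∀ i ∈ pyNbrs start, 0 ≤ i → i < 100001 →
              vget (procL db (w :: ft)).1 i.toNat ≠ -1 := by
            intro i hi h1 h2
            by_cases hd0 : d = 0
            · obtain ⟨hz0, hq0⟩ := hseed0 hd0
              exact L9 start (by rw [hq0]; exact List.mem_cons_self) (hz0 _) i hi h1 h2
            · have h := hclseed (by omega) i hi h1 h2
              rw [L8 _ h]; exact h
          have hclB : ∀ j, j < 100001 → vget (levelA (d + 1) va #[] (v :: qt)).1 j ≠ 0 →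
              j ≠ pyIdx start → ∀ i ∈ pyNbrs (j : Int), 0 ≤ i → i < 100001 →
              vget (procL db (w :: ft)).1 i.toNat ≠ -1 := by
            intro j hj hSj hjne i hi h1 h2
            rcases (L3 j).mp hSj with h | ⟨u', hu', hpu⟩
            · have h' := hcl j hj h hjne i hi h1 h2
              rw [L8 _ h']; exact h'
            · rcases hq u' hu' with ⟨hu1, hu2⟩ | rfl
              · have huj : u' = (j : Int) := by
                  rw [pyIdx_nonneg u' hu1] at hpu; omega
                by_cases hvu : vget va j = 0
                · refine L9 u' hu' ?_ i ?_ h1 h2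
                  · rw [hpu]; exact hvu
                  · rw [huj]; exact hi
                · have h' := hcl j hj hvu hjne i hi h1 h2
                  rw [L8 _ h']; exact h'
              · exact absurd hpu.symm hjne
          have hcard : countF (procL db (w :: ft)).1 + (procL db (w :: ft)).2.length
              ≤ countF db := by
            refine card_step db _ _ L8 ?_ ?_
            · intro x hx
              rw [hL6'] at hx
              obtain ⟨hm, hxq⟩ := dedupF_mem _ _ _ hx
              have hx0 : vget (levelA (d + 1) va #[] (v :: qt)).1 (pyIdx x) = 0 := by
                simpa [mkv] using hm
              have hxr := L7 x hxq
              have hpx : pyIdx x < 100001 := by rw [pyIdx_nonneg x hxr.1]; omega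
              have hva0 : vget va (pyIdx x) = 0 := by
                by_contra h
                exact ((L3 _).mpr (Or.inl h)) hx0
              have hnq : ¬ inQ (v :: qt) (pyIdx x) := by
                intro h
                exact ((L3 _).mpr (Or.inr h)) hx0
              have hdbx : vget db (pyIdx x) = -1 := by
                obtain ⟨-, -, -, m4⟩ := hMV (pyIdx x) hpx
                exact m4 hva0 hnq (inQ_nil _)
              have hdbx' : vget (procL db (w :: ft)).1 (pyIdx x) ≠ -1 := by
                obtain ⟨-, -, m3, -⟩ := L5 (pyIdx x) hpx
                have := m3 hx0 (inQ_nil _) ⟨x, hxq, rfl⟩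
                omega
              exact ⟨hdbx, hdbx', hpx⟩
            · rw [hL6']
              exact dedupF_nodup _ _
          have hrec := IH fl (by omega) (levelA (d + 1) va #[] (v :: qt)).2.toList
            (levelA (d + 1) va #[] (v :: qt)).1 (procL db (w :: ft)).1 (d + 1) fuelB'
            L1 L2 hq2 (by omega)
            (fun u' hu' => Or.inl (L7 u' hu'))
            (fun w1 h1 w2 h2 heq => by
              have e1 := L7 w1 h1
              have e2 := L7 w2 h2
              rw [pyIdx_nonneg w1 e1.1, pyIdx_nonneg w2 e2.1] at heq
              omega)
            (fun j => by
              rcases L4 j with h | ⟨h, -⟩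
              · rw [h]; exact hvp j
              · rw [h]; omega)
            (MV_shift _ _ _ _ L5)
            (Or.inl hz)
            (fun hcon => absurd hcon (by omega))
            (fun _ => hS0)
            (fun _ => hseedB)
            hclB
            (by omega)
            (by
              have h1 : 2 * countF db + 1 ≤ fuelB' := by omega
              rw [← hL6']
              omega)
          rw [hL6']
          exact hrec
      · rw [if_neg hz]
        have hvend : vget (levelA (d + 1) va #[] (v :: qt)).1 (pyIdx end_) = d + 1 := by
          rcases L4 (pyIdx end_) with h | ⟨h, -⟩
          · rw [hend0] at h; exact absurd h hz
          · exact h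
        have hdb' : vget (procL db (w :: ft)).1 (pyIdx end_) = d := by
          have h := (L5 (pyIdx end_) hpe).1 hz
          rw [hvend] at h
          omega
        rw [loopB_mono _ _ _ _ (by rw [hdb']; omega), hdb']
        omega

-- one unfolded iteration for start ≤ -2: no move stays in range
lemma levelA_neg (start : Int) (hs1 : -100001 ≤ start) (hs2 : start ≤ -2)
    (R : Array Int) (hR : ∀ j, vget R j = 0) :
    levelA 1 R #[] [start] = (vset R (pyIdx start) 1, #[]) := by
  rw [levelA]
  rw [if_pos (hR _)]
  simp only [pyNbrs, List.foldl]
  rw [stepA, if_neg (by omega), stepA, if_neg (by omega), stepA, if_neg (by omega)]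
  rfl

lemma pyIdx_neg_lt (start : Int) (hs1 : -100001 ≤ start) (hs2 : start ≤ -2) :
    pyIdx start < 100001 := by
  unfold pyIdx; split <;> omega

-- ===== the negative-start corner (both programs), used for ¬D_ and for D_ =====
lemma bfs_neg (start end_ : Int) (hs1 : -100001 ≤ start) (hs2 : start ≤ -2)
    (he1 : -100001 ≤ end_) (he2 : end_ ≤ 100000) :
    bfs start end_ = 0 := by
  unfold bfs
  have hgen : ∀ (R : Array Int), R.size = 100001 → (∀ j, vget R j = 0) →
      loopA end_ 200005 [start] R 0 = 0 := by
    intro R hRs hR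
    have hlev := levelA_neg start hs1 hs2 R hR
    rw [show (200005 : Nat) = 200004 + 1 from rfl]
    rw [loopA_cons]
    simp only [show (0:Int) + 1 = 1 from rfl]
    rw [hlev]
    dsimp only
    by_cases hmod : (end_ - start) % 100001 = 0
    · have hpe : pyIdx end_ = pyIdx start := pyIdx_eq_of_mod start end_ hs1 hs2 he1 he2 hmod
      have hv : vget (vset R (pyIdx start) 1) (pyIdx end_) = 1 := by
        rw [hpe]
        exact vget_vset_self _ _ _ (by rw [hRs]; exact pyIdx_neg_lt start hs1 hs2)
      rw [if_neg (by rw [hv]; norm_num)]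
      norm_num
    · have hpe : pyIdx end_ ≠ pyIdx start := pyIdx_ne_of_not_mod start end_ hs1 hs2 he1 he2 hmod
      have hv : vget (vset R (pyIdx start) 1) (pyIdx end_) = 0 := by
        rw [vget_vset_ne _ _ _ _ hpe]; exact hR _
      rw [if_pos hv]
      rw [show (200004 : Nat) = 200003 + 1 from rfl]
      rw [loopA_nil]
      norm_num
  exact hgen _ Array.size_replicate (fun j => vget_replicate _ _)

lemma bfs_alt_neg_same (start end_ : Int) (hs1 : -100001 ≤ start) (hs2 : start ≤ -2)
    (he1 : -100001 ≤ end_) (he2 : end_ ≤ 100000) (h : (end_ - start) % 100001 = 0) :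
    bfs_alt start end_ = 0 := by
  unfold bfs_alt
  have hpe : pyIdx end_ = pyIdx start := pyIdx_eq_of_mod start end_ hs1 hs2 he1 he2 h
  have h0 : vget (vset (Array.replicate 100001 (-1)) (pyIdx start) 0) (pyIdx end_) = 0 := by
    rw [hpe]
    exact vget_vset_self _ _ _
      (by rw [Array.size_replicate]; exact pyIdx_neg_lt start hs1 hs2)
  rw [loopB_mono _ _ _ _ (by rw [h0]; omega), h0]

lemma bfs_alt_neg_diff (start end_ : Int) (hs1 : -100001 ≤ start) (hs2 : start ≤ -2)
    (he1 : -100001 ≤ end_) (he2 : end_ ≤ 100000) (h : ¬ (end_ - start) % 100001 = 0) :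
    bfs_alt start end_ = -1 := by
  unfold bfs_alt
  have hpe : pyIdx end_ ≠ pyIdx start := pyIdx_ne_of_not_mod start end_ hs1 hs2 he1 he2 h
  have hpel : pyIdx end_ < 100001 := pyIdx_lt end_ he1 he2
  have hfold : (pyNbrs start).foldl (nstep start)
      ((vset (Array.replicate 100001 (-1)) (pyIdx start) 0), ([] : List Int)) =
      ((vset (Array.replicate 100001 (-1)) (pyIdx start) 0), ([] : List Int)) := by
    simp only [pyNbrs, List.foldl]
    rw [nstep_out _ _ _ _ (by omega), nstep_out _ _ _ _ (by omega),
      nstep_out _ _ _ _ (by omega)]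
  have h2 : ((pyNbrs start).foldl (nstep start)
      ((vset (Array.replicate 100001 (-1)) (pyIdx start) 0), ([] : List Int))).2 = [] := by
    rw [hfold]
  have h1 : ((pyNbrs start).foldl (nstep start)
      ((vset (Array.replicate 100001 (-1)) (pyIdx start) 0), ([] : List Int))).1 =
      vset (Array.replicate 100001 (-1)) (pyIdx start) 0 := by
    rw [hfold]
  rw [show (300005 : Nat) = 300004 + 1 from rfl, loopB_cons, h2, h1,
    show (300004 : Nat) = 300003 + 1 from rfl, loopB_nil]
  rw [vget_vset_ne _ _ _ _ hpe]
  exact vget_replicate_neg _ _ hpel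

lemma bfs_eq_main (start end_ : Int) (hs1 : -1 ≤ start) (hs2 : start ≤ 100000)
    (he1 : -100001 ≤ end_) (he2 : end_ ≤ 100000) :
    bfs start end_ = bfs_alt start end_ := by
  unfold bfs bfs_alt
  have hps : pyIdx start < 100001 := pyIdx_lt start (by omega) hs2
  have hded : dedupF (mkv (Array.replicate 100001 0)) [start] = [start] := by
    simp only [dedupF]
    rw [if_neg (by simp [mkv, vget_replicate])]
  have hMV0 : MV (Array.replicate 100001 0) [start] [] 0
      (vset (Array.replicate 100001 (-1)) (pyIdx start) 0) := by
    intro j hj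
    refine ⟨fun h0 => absurd (vget_replicate _ j) h0, fun _ hq => ?_,
      fun _ _ habs => absurd habs (inQ_nil j), fun _ hnq _ => ?_⟩
    · obtain ⟨u, hu, hpu⟩ := hq
      rw [List.mem_singleton] at hu
      subst hu
      rw [← hpu]
      exact vget_vset_self _ _ _ (by rw [Array.size_replicate]; exact hps)
    · have hne : j ≠ pyIdx start := fun he => hnq ⟨start, List.mem_singleton.mpr rfl, he.symm⟩
      rw [vget_vset_ne _ _ _ _ hne]
      exact vget_replicate_neg _ _ hj
  have hfA : 2 * (100001 - countM (Array.replicate 100001 0)) + 2 ≤ 200005 := by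
    have hc : countM (Array.replicate 100001 0) = 0 := by
      simp [countM, vget_replicate]
    rw [hc]
    norm_num
  have hfB : (dedupF (mkv (Array.replicate 100001 0)) [start]).length +
      2 * countF (vset (Array.replicate 100001 (-1)) (pyIdx start) 0) + 1 ≤ 300005 := by
    rw [hded]
    have := countF_le (vset (Array.replicate 100001 (-1)) (pyIdx start) 0)
    simp only [List.length_singleton]
    omega
  have hmain := main_sim start end_ hs1 hs2 he1 he2 200005 [start]
    (Array.replicate 100001 0) (vset (Array.replicate 100001 (-1)) (pyIdx start) 0) 0 300005
    Array.size_replicate (by rw [size_vset]; exact Array.size_replicate)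
    (by simp) le_rfl
    (fun u hu => by rw [List.mem_singleton] at hu; exact Or.inr hu)
    (fun w1 h1 w2 h2 _ => by rw [List.mem_singleton] at h1 h2; rw [h1, h2])
    (fun j => by rw [vget_replicate])
    hMV0
    (Or.inr rfl)
    (fun _ => ⟨fun j => vget_replicate _ _, rfl⟩)
    (fun h1 => absurd h1 (by omega))
    (fun h1 => absurd h1 (by omega))
    (fun j hj hcon => absurd (vget_replicate _ j) hcon)
    hfA hfB
  rw [hded] at hmain
  exact hmain

-- ===== VERDICT (by name: the statements are the Claim_ definitions above) =====
theorem bfs_spec : Claim_unchanged_bfs := by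
  intro start end_ _ hpre
  obtain ⟨h1, h2, h3, h4⟩ := hpre
  intro hD
  by_cases hneg : start ≤ -2
  · have hmod : (end_ - start) % 100001 = 0 := by
      by_contra hm; exact hD ⟨hneg, hm⟩
    rw [bfs_neg start end_ h1 hneg h3 h4, bfs_alt_neg_same start end_ h1 hneg h3 h4 hmod]
  · exact bfs_eq_main start end_ (by omega) h2 h3 h4

theorem bfs_changed : Claim_changed_bfs := by
  unfold Claim_changed_bfs
  simp only [pvDiffWitness_bfs, pvDiffWitnessOut_bfs]
  refine ⟨by decide, by decide, by decide, ?_, ?_, by decide⟩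
  · exact bfs_neg (-100000) 3 (by norm_num) (by norm_num) (by norm_num) (by norm_num)
  · exact bfs_alt_neg_diff (-100000) 3 (by norm_num) (by norm_num) (by norm_num) (by norm_num)
      (by decide)

theorem bfs_tight : Claim_exact_bfs := by
  intro start end_ _ hpre hD
  obtain ⟨h1, h2, h3, h4⟩ := hpre
  obtain ⟨hneg, hmod⟩ := hD
  rw [bfs_neg start end_ h1 hneg h3 h4, bfs_alt_neg_diff start end_ h1 hneg h3 h4 hmod]
  decide
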